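-- pv_equiv track=rewrite | github.com/WenqiJiang/VGG16_FPGA_Accelerator | fixed_point/fixed_arith.py | int_digit
-- ===== SOURCE A (Python) =====
-- def int_digit(x):
--     """given an input x, detect how much integer digit it needs
--     x: a arbitary number
--     """
--     if x >= 32767 or x <= -32768:
--         raise Exception("digit out of range for fixed point 16")
--     else:
--         pass
--
--     exp_range = [1, 2, 4, 8, 16, 32, 64, 128, 256, 512, 1024, 2048,
--              4096, 8192, 16384,32768]
--
--     for i, r in enumerate(exp_range):
--         if abs(int(x)) <= r - 1:
--             return i
--     raise Exception("digit out of range for fixed point 16")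
--
--     return 0
-- ===== SOURCE B (Python) =====
-- def int_digit(x):
--     """given an input x, detect how much integer digit it needs
--     x: a arbitary number
--     """
--     if x >= 32767 or x <= -32768:
--         raise Exception("digit out of range for fixed point 16")
--     return abs(int(x)).bit_length()
-- ===== Notes on version B (the rewrite author's own statement) =====
-- stated objective: idiomatic
-- what changed: Replaces the linear scan over the power-of-two table with the closed-form bit count abs(int(x)).bit_length(); the table and the unreachable trailing raise disappear.
import Mathlib
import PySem

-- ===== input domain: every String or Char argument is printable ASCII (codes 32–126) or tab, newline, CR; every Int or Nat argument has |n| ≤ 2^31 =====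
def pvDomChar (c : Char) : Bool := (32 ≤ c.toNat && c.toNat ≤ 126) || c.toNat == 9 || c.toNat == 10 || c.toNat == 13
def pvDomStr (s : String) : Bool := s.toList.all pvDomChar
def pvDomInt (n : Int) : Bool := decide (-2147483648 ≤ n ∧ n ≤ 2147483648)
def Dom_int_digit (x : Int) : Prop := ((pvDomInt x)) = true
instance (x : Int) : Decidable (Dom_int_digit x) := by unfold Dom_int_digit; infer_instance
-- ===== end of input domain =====

-- B replaces A's scan over the power-of-two table by the closed-form bit count (idiomatic).

-- ===== PORT A =====
-- the 'for i, r in enumerate(exp_range): if abs(int(x)) <= r - 1: return i' loop;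
-- the trailing 'raise' (list exhausted) is unreachable under Pre_ and ported as 0
def intDigitScan : List (Int × Int) → Int → Int
  | [], _ => 0
  | (i, r) :: rest, a => if a ≤ r - 1 then i else intDigitScan rest a

def int_digit (x : Int) : Int :=
  -- guard raise ported as 0; excluded by Pre_
  if x ≥ 32767 ∨ x ≤ -32768 then 0
  else
    intDigitScan
      (PySem.List.enumerate ([1, 2, 4, 8, 16, 32, 64, 128, 256, 512, 1024, 2048,
        4096, 8192, 16384, 32768] : List Int)) |x|

-- ===== PORT B =====
def int_digit_alt (x : Int) : Int :=
  if x ≥ 32767 ∨ x ≤ -32768 then 0   -- guard raise, excluded by Pre_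
  else ((Nat.size x.natAbs : Nat) : Int)   -- abs(int(x)).bit_length()

-- ===== PRECONDITION & SPEC =====
-- Pre_ excludes exactly the inputs where A raises "digit out of range for fixed point 16"
def Pre_int_digit (x : Int) : Prop := -32768 < x ∧ x < 32767
instance (x : Int) : Decidable (Pre_int_digit x) := by unfold Pre_int_digit; infer_instance
def pvWitness_int_digit : Int := (100)
def Spec_int_digit (x : Int) (out : Int) : Prop := out = int_digit_alt x
instance (x : Int) (out : Int) : Decidable (Spec_int_digit x out) := by unfold Spec_int_digit; infer_instance

-- ===== CLAIM (what is proved, stated in full; the proofs are below) =====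
def Claim_equal_int_digit : Prop := ∀ (x : Int), Dom_int_digit x → Pre_int_digit x → Spec_int_digit x (int_digit x)

-- ===== LEMMAS AND PROOFS =====

-- the enumerate'd table, written as a recursion on (start index, remaining length)
def powL : Nat → Nat → List (Int × Int)
  | _, 0 => []
  | s, len+1 => ((s : Int), ((2:Int)^s)) :: powL (s+1) len

theorem size_le_of (a s : Nat) (h : 2 ^ s ≤ 2 * a + 1) : s ≤ Nat.size a := by
  cases s with
  | zero => exact Nat.zero_le _
  | succ k =>
    have hp : 2 ^ (k+1) = 2 * 2 ^ k := by ring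
    exact Nat.lt_size.mpr (by omega)

-- A's scan over the power table computes Nat.size (Python's bit_length)
theorem scan_powL (len : Nat) : ∀ (s : Nat) (a : Nat), 1 ≤ len → 2 ^ s ≤ 2 * a + 1 →
    a < 2 ^ (s + len - 1) → intDigitScan (powL s len) (a : Int) = (Nat.size a : Int) := by
  induction len with
  | zero => intro s a h; omega
  | succ m ih =>
    intro s a _ hlow hhigh
    simp only [powL, intDigitScan]
    have hcast : ((2 ^ s : Nat) : Int) = (2:Int) ^ s := by push_cast; ring
    by_cases hc : a < 2 ^ s
    · rw [if_pos (by omega)]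
      have h1 : Nat.size a ≤ s := Nat.size_le.mpr hc
      have h2 : s ≤ Nat.size a := size_le_of a s hlow
      omega
    · rw [if_neg (by omega)]
      cases m with
      | zero =>
        exfalso
        have h' : a < 2 ^ s := by simpa using hhigh
        omega
      | succ m' =>
        apply ih (s+1) a (by omega)
        · have hp : 2 ^ (s+1) = 2 * 2 ^ s := by ring
          omega
        · have he : s + (m' + 1 + 1) - 1 = (s + 1) + (m' + 1) - 1 := by omega
          rw [he] at hhigh
          exact hhigh

theorem enum_eq_powL :
    PySem.List.enumerate ([1, 2, 4, 8, 16, 32, 64, 128, 256, 512, 1024, 2048,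
      4096, 8192, 16384, 32768] : List Int) = powL 0 16 := by decide

-- ===== VERDICT (by name: the statement is the Claim_ definition above) =====
theorem int_digit_spec : Claim_equal_int_digit := by
  intro x _ hpre
  unfold Spec_int_digit int_digit int_digit_alt
  obtain ⟨h1, h2⟩ := hpre
  rw [if_neg (by omega), if_neg (by omega)]
  have habs : |x| = (x.natAbs : Int) := Int.abs_eq_natAbs x
  rw [habs, enum_eq_powL]
  exact scan_powL 16 0 x.natAbs (by omega) (by omega) (by norm_num; omega)
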